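-- pv_equiv track=rewrite | github.com/pypi-data/pypi-mirror-175 | packages/deepsport-utilities/deepsport_utilities-4.3.0.tar.gz/deepsport_utilities-4.3.0/deepsport_utilities/utils.py | split_equally
-- ===== SOURCE A (Python) =====
-- def split_equally(d, K):
--     """ splits equally the keys of d given their values
--         arguments:
--             d (dict) - A dict {"label1": 30, "label2": 45, "label3": 22, ... "label<N>": 14}
--             K (int)  - The number of split to make
--         returns:
--             A list of 'K' lists splitting equally the values of 'd':
--             e.g. [[label1, label12, label19], [label2, label15], [label3, label10, label11], ...]
--             where
--             ```
--                d["label1"]+d["label12"]+d["label19"]  ~=  d["label2"]+d["label15"]  ~=  d["label3"]+d["label10"]+d["label11]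
--             ```
--     """
--     s = sorted(d.items(), key=lambda kv: kv[1])
--     f = [{"count": 0, "list": []} for _ in range(K)]
--     while s:
--         arena_label, count = s.pop(-1)
--         index, _ = min(enumerate(f), key=(lambda x: x[1]["count"]))
--         f[index]["count"] += count
--         f[index]["list"].append(arena_label)
--     return [x["list"] for x in f]
-- ===== SOURCE B (Python) =====
-- def _insert_sorted(item, bins):
--     """insert item into bins kept sorted by (count, index); the label lists are never compared."""
--     for k, b in enumerate(bins):
--         if item[0] < b[0] or (item[0] == b[0] and item[1] < b[1]):
--             return bins[:k] + [item] + bins[k:]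
--     return bins + [item]
--
--
-- def split_equally(d, K):
--     # bins kept as a list of (count, index, labels) sorted by (count, index):
--     # the lightest bin (with the first-index tie-break of the argmin scan) is always bins[0].
--     items = sorted(d.items(), key=lambda kv: kv[1])
--     bins = [(0, i, []) for i in range(K)]
--     for label, count in reversed(items):
--         c, i, lst = bins[0]
--         bins = _insert_sorted((c + count, i, lst + [label]), bins[1:])
--     return [lst for _, _, lst in sorted(bins, key=lambda b: b[1])]
-- ===== Notes on version B (the rewrite author's own statement) =====
-- stated objective: alternative
-- what changed: A rescans all K bins with an argmin over enumerate(f) for every item; B instead keeps the bins as a list sorted by (count, index), pops the lightest bin from the front and re-inserts it in order, recovering the index order only once at the end.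
import Mathlib
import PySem

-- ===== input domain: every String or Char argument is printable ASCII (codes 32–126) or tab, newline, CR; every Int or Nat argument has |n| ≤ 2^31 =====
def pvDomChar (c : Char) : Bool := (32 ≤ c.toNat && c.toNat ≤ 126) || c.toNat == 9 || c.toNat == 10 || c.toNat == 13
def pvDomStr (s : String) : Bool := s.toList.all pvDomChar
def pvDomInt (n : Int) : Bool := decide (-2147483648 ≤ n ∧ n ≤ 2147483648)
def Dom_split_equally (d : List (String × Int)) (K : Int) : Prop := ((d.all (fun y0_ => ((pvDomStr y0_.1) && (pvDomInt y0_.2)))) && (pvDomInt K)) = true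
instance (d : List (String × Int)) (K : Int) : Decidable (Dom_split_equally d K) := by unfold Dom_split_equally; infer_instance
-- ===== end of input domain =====

-- B replaces A's per-item argmin scan over all K bins by a bin list kept sorted by
-- (count, index): the lightest bin is popped from the front and re-inserted in order
-- (objective: alternative data structure; same results, return value only — neither mutates its input).

-- ===== PORT A =====
-- one iteration of A's while-loop: pop the largest remaining item and add it to the
-- first bin of minimal count (Python's min over enumerate(f) keyed by "count")
def pvAStep (f : List (Int × List String)) (kv : String × Int) : List (Int × List String) :=
  match PySem.List.min? (PySem.List.enumerate f) (fun x => x.2.1) with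
  | none => f          -- Python: ValueError (min of an empty sequence); excluded by Pre_
  | some m => f.set m.1.toNat (m.2.1 + kv.2, m.2.2 ++ [kv.1])
               -- m = (index, f[index]); index ≥ 0 comes from enumerate, so toNat is exact

def split_equally (d : List (String × Int)) (K : Int) : List (List String) :=
  let s := PySem.List.sorted d (fun kv => kv.2)
  let f := (PySem.List.pyRange 0 K 1).map (fun _ => ((0 : Int), ([] : List String)))
  -- 'while s: … s.pop(-1)' consumes s from the back: fold over s.reverse
  ((s.reverse).foldl pvAStep f).map (fun x => x.2)

-- ===== PORT B =====
-- insert one (count, index, labels) bin into a list sorted by (count, index)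
def pvInsSorted (a : Int × Int × List String) : List (Int × Int × List String) → List (Int × Int × List String)
  | [] => [a]
  | b :: t => if a.1 < b.1 ∨ (a.1 = b.1 ∧ a.2.1 < b.2.1) then a :: b :: t else b :: pvInsSorted a t

-- one iteration of B's loop: pop the lightest bin (front of the sorted list), re-insert it updated
def pvBStep (bins : List (Int × Int × List String)) (kv : String × Int) : List (Int × Int × List String) :=
  match bins with
  | [] => []           -- Python B: IndexError on bins[0]; excluded by Pre_
  | (c, i, l) :: t => pvInsSorted (c + kv.2, i, l ++ [kv.1]) t

def split_equally_alt (d : List (String × Int)) (K : Int) : List (List String) :=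
  let s := PySem.List.sorted d (fun kv => kv.2)
  let bins := (PySem.List.pyRange 0 K 1).map (fun i => ((0 : Int), i, ([] : List String)))
  let bins := (s.reverse).foldl pvBStep bins
  (PySem.List.sorted bins (fun b => b.2.1)).map (fun b => b.2.2)

-- ===== PRECONDITION & SPEC =====
-- Pre_ excludes only K ≤ 0 with d nonempty, where Python A raises ValueError (min of an empty sequence).
def Pre_split_equally (d : List (String × Int)) (K : Int) : Prop := d = [] ∨ 1 ≤ K
instance (d : List (String × Int)) (K : Int) : Decidable (Pre_split_equally d K) := by unfold Pre_split_equally; infer_instance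
def pvWitness_split_equally : (List (String × Int)) × Int := ([("a", 3), ("b", 1), ("c", 2)], 2)

def Spec_split_equally (d : List (String × Int)) (K : Int) (out : List (List String)) : Prop := out = split_equally_alt d K
instance (d : List (String × Int)) (K : Int) (out : List (List String)) : Decidable (Spec_split_equally d K out) := by unfold Spec_split_equally; infer_instance

-- ===== CLAIM (what is proved, stated in full; the proofs are below) =====
def Claim_equal_split_equally : Prop := ∀ (d : List (String × Int)) (K : Int), Dom_split_equally d K → Pre_split_equally d K → Spec_split_equally d K (split_equally d K)

-- ===== LEMMAS AND PROOFS =====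

-- the B-side view of A's bin array: (count, index, labels) triples in index order
def pvTag (f : List (Int × List String)) : List (Int × Int × List String) :=
  (PySem.List.enumerate f).map (fun p => (p.2.1, p.1, p.2.2))

-- the strict (count, index) lexicographic order B's list is sorted by
def pvLexLt (a b : Int × Int × List String) : Prop := a.1 < b.1 ∨ (a.1 = b.1 ∧ a.2.1 < b.2.1)

-- the coupling invariant: B's bins are A's bins rearranged into sorted order
def pvInv (f : List (Int × List String)) (bins : List (Int × Int × List String)) : Prop :=
  bins.Perm (pvTag f) ∧ bins.Pairwise pvLexLt

lemma pv_min_keep (t : List (Int × Int × List String)) : ∀ (c : Int × Int × List String),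
    (∀ y ∈ t, ¬ (y.2.1 < c.2.1)) →
    PySem.List.min? (c :: t) (fun x => x.2.1) = some c := by
  induction t with
  | nil => intro c _; rfl
  | cons y t ih =>
    intro c h
    have hy : ¬ (y.2.1 < c.2.1) := h y (by simp)
    have hred : PySem.List.min? (c :: y :: t) (fun x => x.2.1)
        = PySem.List.min? ((if y.2.1 < c.2.1 then y else c) :: t) (fun x => x.2.1) := by
      by_cases h' : y.2.1 < c.2.1 <;> simp [PySem.List.min?, List.foldl_cons, h']
    rw [hred, if_neg hy]
    exact ih c (fun z hz => h z (by simp [hz]))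

lemma pv_min_found (t : List (Int × Int × List String)) : ∀ (c m : Int × Int × List String),
    t.Pairwise (fun a b => a.1 < b.1) → m ∈ t → m.2.1 < c.2.1 →
    (∀ y ∈ t, m.2.1 < y.2.1 ∨ (m.2.1 = y.2.1 ∧ m.1 ≤ y.1)) →
    PySem.List.min? (c :: t) (fun x => x.2.1) = some m := by
  induction t with
  | nil => intro c m _ hm; simp at hm
  | cons y t ih =>
    intro c m hs hm hc hmin
    have hred : PySem.List.min? (c :: y :: t) (fun x => x.2.1)
        = PySem.List.min? ((if y.2.1 < c.2.1 then y else c) :: t) (fun x => x.2.1) := by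
      by_cases h' : y.2.1 < c.2.1 <;> simp [PySem.List.min?, List.foldl_cons, h']
    rw [hred]
    rcases List.mem_cons.mp hm with hm | hm
    · subst hm
      rw [if_pos hc]
      exact pv_min_keep t m (fun z hz => by
        rcases hmin z (by simp [hz]) with h | h
        · omega
        · omega)
    · have hy1 : y.1 < m.1 := (List.pairwise_cons.mp hs).1 m hm
      have hym : m.2.1 < y.2.1 := by
        rcases hmin y (by simp) with h | h
        · exact h
        · omega
      have hlt : m.2.1 < (if y.2.1 < c.2.1 then y else c).2.1 := by
        split <;> omega
      exact ih _ m (List.pairwise_cons.mp hs).2 hm hlt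
        (fun z hz => hmin z (by simp [hz]))

lemma pv_enum_replicate (c : Int × List String) (n : Nat) : ∀ (s : Int),
    PySem.List.enumerate (List.replicate n c) s
      = (List.range n).map (fun k : Nat => ((s + (k : Int)), c)) := by
  induction n with
  | zero => intro s; rfl
  | succ n ih =>
    intro s
    rw [List.replicate_succ, PySem.List.enumerate_cons, ih (s+1), List.range_succ_eq_map]
    simp only [List.map_cons, List.map_map, Function.comp_def, Nat.cast_zero, add_zero]
    congr 1
    exact List.map_congr_left (fun k _ => by push_cast; ring_nf)

lemma pv_insSorted_perm (a : Int × Int × List String) (l : List (Int × Int × List String)) :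
    (pvInsSorted a l).Perm (a :: l) := by
  induction l with
  | nil => rfl
  | cons b t ih =>
    simp only [pvInsSorted]
    split
    · rfl
    · exact (ih.cons b).trans (List.Perm.swap a b t)

lemma pv_insSorted_sorted (a : Int × Int × List String) (l : List (Int × Int × List String))
    (hl : l.Pairwise pvLexLt) (htot : ∀ b ∈ l, a.2.1 ≠ b.2.1) :
    (pvInsSorted a l).Pairwise pvLexLt := by
  induction l with
  | nil => simp [pvInsSorted, pvLexLt]
  | cons b t ih =>
    obtain ⟨hb, ht⟩ := List.pairwise_cons.mp hl
    simp only [pvInsSorted]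
    split
    · rename_i hab
      refine List.pairwise_cons.mpr ⟨?_, hl⟩
      intro z hz
      rcases List.mem_cons.mp hz with rfl | hz
      · exact hab
      · have := hb z hz
        unfold pvLexLt at *
        omega
    · rename_i hab
      have hba : pvLexLt b a := by
        have := htot b (by simp)
        unfold pvLexLt
        omega
      refine List.pairwise_cons.mpr ⟨?_, ih ht (fun z hz => htot z (by simp [hz]))⟩
      intro z hz
      have hz2 : z ∈ a :: t := (pv_insSorted_perm a t).mem_iff.mp hz
      rcases List.mem_cons.mp hz2 with rfl | hz2
      · exact hba
      · exact hb z hz2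

lemma pv_min_lex (xs : List (Int × Int × List String)) (m : Int × Int × List String)
    (hs : xs.Pairwise (fun a b => a.1 < b.1)) (hm : m ∈ xs)
    (hmin : ∀ y ∈ xs, m.2.1 < y.2.1 ∨ (m.2.1 = y.2.1 ∧ m.1 ≤ y.1)) :
    PySem.List.min? xs (fun x => x.2.1) = some m := by
  match xs with
  | [] => simp at hm
  | c :: t =>
    rcases List.mem_cons.mp hm with rfl | hm
    · exact pv_min_keep t m (fun z hz => by
        rcases hmin z (by simp [hz]) with h | h <;> omega)
    · have hc1 : c.1 < m.1 := (List.pairwise_cons.mp hs).1 m hm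
      have hc : m.2.1 < c.2.1 := by
        rcases hmin c (by simp) with h | h
        · exact h
        · omega
      exact pv_min_found t c m (List.pairwise_cons.mp hs).2 hm hc
        (fun z hz => hmin z (by simp [hz]))

lemma pv_enumerate_set (f : List (Int × List String)) : ∀ (k : Nat) (v : Int × List String) (s : Int),
    PySem.List.enumerate (f.set k v) s = (PySem.List.enumerate f s).set k ((s + (k : Int)), v) := by
  induction f with
  | nil => intro k v s; rfl
  | cons x t ih =>
    intro k v s
    cases k with
    | zero => simp [PySem.List.enumerate_cons]
    | succ k =>
      simp only [List.set_cons_succ, PySem.List.enumerate_cons, ih k v (s+1)]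
      have hc : (s : Int) + 1 + (k : Int) = s + ((k : Nat) + 1 : Nat) := by push_cast; ring
      rw [hc]

lemma pv_set_perm {A : Type} (xs : List A) : ∀ (k : Nat) (v w : A), xs[k]? = some w →
    (xs.set k v).Perm (v :: xs.eraseIdx k) ∧ xs.Perm (w :: xs.eraseIdx k) := by
  induction xs with
  | nil => intro k v w h; simp at h
  | cons x t ih =>
    intro k v w h
    cases k with
    | zero =>
      simp only [List.getElem?_cons_zero, Option.some_inj] at h
      subst h
      simp [List.set_cons_zero]
    | succ k =>
      simp only [List.getElem?_cons_succ] at h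
      obtain ⟨h1, h2⟩ := ih k v w h
      constructor
      · exact (h1.cons x).trans (List.Perm.swap v x _)
      · exact (h2.cons x).trans (List.Perm.swap w x _)

lemma pv_step (f : List (Int × List String)) (bins : List (Int × Int × List String))
    (kv : String × Int) (h : pvInv f bins) : pvInv (pvAStep f kv) (pvBStep bins kv) := by
  obtain ⟨hperm, hsort⟩ := h
  match hb : bins, hperm, hsort with
  | [], hperm, hsort =>
    have htag : pvTag f = [] := hperm.symm.eq_nil
    have hf : f = [] := by
      cases f with
      | nil => rfl
      | cons x t => simp [pvTag, PySem.List.enumerate_cons] at htag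
    subst hf
    exact ⟨List.Perm.refl _, List.Pairwise.nil⟩
  | hd :: t, hperm, hsort =>
    -- locate hd inside A's bin array
    have hhd : hd ∈ pvTag f := hperm.mem_iff.mp (List.mem_cons_self)
    obtain ⟨p, hp, hpe⟩ := List.mem_map.mp hhd
    obtain ⟨k, hk, hpk⟩ := (PySem.List.mem_enumerate_iff _ _ _).mp hp
    -- Python's min over enumerate(f) returns exactly (index, f[index]) for hd
    have hmin : PySem.List.min? (PySem.List.enumerate f) (fun x => x.2.1)
        = some (hd.2.1, hd.1, hd.2.2) := by
      apply pv_min_lex _ _ (PySem.List.pairwise_lt_enumerate f 0)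
      · have : ((0 : Int) + k, f[k]) ∈ PySem.List.enumerate f :=
          (PySem.List.mem_enumerate_iff _ _ _).mpr ⟨k, hk, rfl⟩
        have he : (hd.2.1, hd.1, hd.2.2) = ((0 : Int) + k, f[k]) := by
          rw [← hpe, hpk]
        rw [he]; exact this
      · intro y hy
        have hz : (y.2.1, y.1, y.2.2) ∈ pvTag f := List.mem_map.mpr ⟨y, hy, rfl⟩
        rcases List.mem_cons.mp (hperm.symm.mem_iff.mp hz) with hzh | hzt
        · right
          constructor
          · have := congrArg (fun q => q.1) hzh
            simpa using this.symm
          · have := congrArg (fun q => q.2.1) hzh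
            simp at this
            omega
        · have hlex := List.rel_of_pairwise_cons hsort hzt
          unfold pvLexLt at hlex
          rcases hlex with h1 | ⟨h1, h2⟩
          · left; simpa using h1
          · right
            refine ⟨by simpa using h1, ?_⟩
            simp at h2 ⊢
            omega
    -- facts about the located index
    have hhd1 : hd.1 = p.2.1 := by rw [← hpe]
    have hhd21 : hd.2.1 = p.1 := by rw [← hpe]
    have hhd22 : hd.2.2 = p.2.2 := by rw [← hpe]
    have hidx : p.1 = (k : Int) := by rw [hpk]; simp
    have hfk : p.2 = f[k] := by rw [hpk]
    have htonat : hd.2.1.toNat = k := by rw [hhd21, hidx]; simp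
    -- the two successor states
    have hA : pvAStep f kv = f.set k (hd.1 + kv.2, hd.2.2 ++ [kv.1]) := by
      unfold pvAStep
      rw [hmin]
      simp only [htonat]
    have hB : pvBStep (hd :: t) kv = pvInsSorted (hd.1 + kv.2, hd.2.1, hd.2.2 ++ [kv.1]) t := by
      rfl
    rw [hA, hB]
    set new : Int × Int × List String := (hd.1 + kv.2, hd.2.1, hd.2.2 ++ [kv.1]) with hnew
    -- pvTag of the updated array is pvTag f with entry k replaced by new
    have htagset : pvTag (f.set k (hd.1 + kv.2, hd.2.2 ++ [kv.1])) = (pvTag f).set k new := by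
      unfold pvTag
      rw [pv_enumerate_set f k _ 0, List.map_set]
      congr 1
      rw [hnew, hhd21, hidx]
      simp
    have hgetk : (pvTag f)[k]? = some hd := by
      unfold pvTag
      rw [List.getElem?_map, PySem.List.getElem?_enumerate]
      rw [List.getElem?_eq_getElem hk]
      simp only [Option.map_some]
      rw [← hpe, hpk]
    obtain ⟨hset1, hset2⟩ := pv_set_perm (pvTag f) k new hd hgetk
    -- t is a permutation of pvTag f minus the entry at k
    have ht : ((pvTag f).eraseIdx k).Perm t := by
      have : (hd :: t).Perm (hd :: (pvTag f).eraseIdx k) := hperm.trans hset2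
      exact (this.cons_inv).symm
    constructor
    · -- permutation
      have h1 : (pvInsSorted new t).Perm (new :: t) := pv_insSorted_perm new t
      have h2 : (new :: t).Perm (new :: (pvTag f).eraseIdx k) := (ht.symm).cons new
      rw [htagset]
      exact (h1.trans h2).trans hset1.symm
    · -- sortedness
      have hnodup : ((hd :: t).map (fun b => b.2.1)).Nodup := by
        have hmapeq : (pvTag f).map (fun b => b.2.1) = (PySem.List.enumerate f).map (fun p => p.1) := by
          unfold pvTag; rw [List.map_map]; rfl
        have : ((pvTag f).map (fun b => b.2.1)).Nodup := by
          rw [hmapeq, PySem.List.map_fst_enumerate]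
          exact PySem.List.nodup_pyRange_one 0 (0 + (f.length : Int))
        exact ((hperm.map (fun b => b.2.1)).nodup_iff).mpr this
      have htot : ∀ b ∈ t, new.2.1 ≠ b.2.1 := by
        intro b hbt he
        have hmem : hd.2.1 ∈ t.map (fun b => b.2.1) := by
          rw [show hd.2.1 = b.2.1 from he]
          exact List.mem_map_of_mem hbt
        exact (List.nodup_cons.mp hnodup).1 hmem
      exact pv_insSorted_sorted new t (List.pairwise_cons.mp hsort).2 htot

lemma pv_fold (items : List (String × Int)) : ∀ (f : List (Int × List String))
    (bins : List (Int × Int × List String)), pvInv f bins →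
    pvInv (items.foldl pvAStep f) (items.foldl pvBStep bins) := by
  induction items with
  | nil => intro f bins h; exact h
  | cons kv items ih =>
    intro f bins h
    exact ih _ _ (pv_step f bins kv h)

lemma pv_init (K : Int) :
    pvInv ((PySem.List.pyRange 0 K 1).map (fun _ => ((0 : Int), ([] : List String))))
          ((PySem.List.pyRange 0 K 1).map (fun i => ((0 : Int), i, ([] : List String)))) := by
  have hn : (PySem.List.pyRange 0 K 1).map (fun _ => ((0 : Int), ([] : List String)))
      = List.replicate (K - 0).toNat ((0 : Int), ([] : List String)) := by
    rw [List.map_const', PySem.List.length_pyRange_one]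
  have htag : pvTag ((PySem.List.pyRange 0 K 1).map (fun _ => ((0 : Int), ([] : List String))))
      = (List.range (K - 0).toNat).map (fun k : Nat => ((0 : Int), ((0 : Int) + k), ([] : List String))) := by
    unfold pvTag
    rw [hn, pv_enum_replicate]
    simp [List.map_map, Function.comp_def]
  have hbins : (PySem.List.pyRange 0 K 1).map (fun i => ((0 : Int), i, ([] : List String)))
      = (List.range (K - 0).toNat).map (fun k : Nat => ((0 : Int), ((0 : Int) + k), ([] : List String))) := by
    rw [PySem.List.pyRange_one]
    simp [List.map_map, Function.comp_def]
  constructor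
  · rw [htag, hbins]
  · rw [hbins, List.pairwise_map]
    exact (List.pairwise_lt_range).imp (fun {a b} hab => Or.inr ⟨rfl, by simp; omega⟩)

lemma pv_final (f : List (Int × List String)) (bins : List (Int × Int × List String))
    (h : pvInv f bins) :
    (PySem.List.sorted bins (fun b => b.2.1)).map (fun b => b.2.2) = f.map (fun x => x.2) := by
  have hpair : (pvTag f).Pairwise (fun a b => a.2.1 < b.2.1) := by
    unfold pvTag
    rw [List.pairwise_map]
    exact (PySem.List.pairwise_lt_enumerate f 0).imp (fun {a b} hab => by simpa using hab)
  have hsorted : PySem.List.sorted bins (fun b => b.2.1) = pvTag f :=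
    PySem.List.sorted_eq_of_perm_of_pairwise_lt bins (pvTag f) _ h.1.symm hpair
  rw [hsorted]
  unfold pvTag
  rw [List.map_map]
  conv_rhs => rw [← PySem.List.map_snd_enumerate f 0]
  rw [List.map_map]
  rfl

-- ===== VERDICT (by name: the statement is the Claim_ definition above) =====
theorem split_equally_spec : Claim_equal_split_equally := by
  intro d K _dom _pre
  unfold Spec_split_equally split_equally split_equally_alt
  have h := pv_fold ((PySem.List.sorted d (fun kv => kv.2)).reverse) _ _ (pv_init K)
  exact (pv_final _ _ h).symm
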